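-- pv_equiv track=rewrite | github.com/jpgil/logdelay | src/theory202104.py | sequence_cardinality
-- ===== SOURCE A (Python) =====
-- def sequence_cardinality(S, T):
--     '''
--     Returns the cardinality if S=abc...z is a sequence in T, otherwise it returns -1
--     '''
--     # Force type to list
--     if type(S)==type(''):
--         S = list(S.strip())
--
--     # two or more symbols only
--     if len(S) < 2:
--         return -1
--
--     # Check all symbols are different
--     if len(S) != len(set(S)):
--         return -1
--
--     intersection=[a for a in T if a in S ]
--     cardinality=int(len(intersection) / len(S)  )
--     return cardinality if S*cardinality==intersection else -1
-- ===== SOURCE B (Python) =====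
-- def sequence_cardinality(S, T):
--     '''
--     Returns the cardinality if S=abc...z is a sequence in T, otherwise it returns -1
--     '''
--     # Force type to list
--     if type(S) == type(''):
--         S = list(S.strip())
--
--     # two or more symbols only
--     if len(S) < 2:
--         return -1
--
--     # Check all symbols are different
--     if len(S) != len(set(S)):
--         return -1
--
--     # Single streaming pass: no filtered list, no S*cardinality list.
--     n = len(S)
--     pos = 0
--     ok = True
--     for a in T:
--         if a in S:
--             if a != S[pos % n]:
--                 ok = False
--             pos += 1
--     return pos // n if ok and pos % n == 0 else -1
-- ===== Notes on version B (the rewrite author's own statement) =====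
-- stated objective: alternative
-- what changed: Replaces the build-filtered-list + build-S*cardinality-list + list-compare with a single streaming pass over T that keeps only an integer position and a boolean flag, checking each relevant element against S[pos % len(S)] on the fly; it trades the intermediate lists for O(1) extra state at the same overall cost.
import Mathlib
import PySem

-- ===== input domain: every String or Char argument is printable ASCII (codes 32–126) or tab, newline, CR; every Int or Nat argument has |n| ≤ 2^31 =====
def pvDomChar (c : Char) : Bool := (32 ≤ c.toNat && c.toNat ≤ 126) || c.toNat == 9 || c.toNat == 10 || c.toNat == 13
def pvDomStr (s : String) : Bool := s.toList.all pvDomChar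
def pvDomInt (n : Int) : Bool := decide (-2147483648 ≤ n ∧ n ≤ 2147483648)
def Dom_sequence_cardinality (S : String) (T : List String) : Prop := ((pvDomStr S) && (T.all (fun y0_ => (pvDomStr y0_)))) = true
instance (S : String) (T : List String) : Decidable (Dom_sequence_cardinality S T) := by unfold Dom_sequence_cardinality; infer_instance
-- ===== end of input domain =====

-- B replaces A's filtered-list + repeated-list comparison by a single streaming
-- pass over T with only a position counter and a flag (objective: alternative).

-- list(S.strip()) : the characters of the stripped string as one-char Python strings
def pvSyms (S : String) : List String :=
  (PySem.Str.strip S).toList.map (fun c => String.mk [c])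

-- ===== PORT A =====
def sequence_cardinality (S : String) (T : List String) : Int :=
  let Sl := pvSyms S
  if Sl.length < 2 then -1
  else if Sl.length ≠ (PySem.Set.ofList Sl).length then -1
  else
    let intersection := T.filter (fun a => decide (a ∈ Sl))
    -- int(len/len): exact floor division here (both operands nonneg ints)
    let cardinality : Int := Int.ofNat (intersection.length / Sl.length)
    if (List.replicate cardinality.toNat Sl).flatten = intersection then cardinality else -1

-- ===== PORT B =====
def sequence_cardinality_alt (S : String) (T : List String) : Int :=
  let Sl := pvSyms S
  if Sl.length < 2 then -1
  else if Sl.length ≠ (PySem.Set.ofList Sl).length then -1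
  else
    let n := Sl.length
    let st := T.foldl
      (fun (st : Nat × Bool) a =>
        if a ∈ Sl then (st.1 + 1, st.2 && (a == Sl.getD (st.1 % n) "")) else st)
      (0, true)
    if st.2 && (st.1 % n == 0) then Int.ofNat (st.1 / n) else -1

-- ===== PRECONDITION & SPEC =====
def Spec_sequence_cardinality (S : String) (T : List String) (out : Int) : Prop := out = sequence_cardinality_alt S T
instance (S : String) (T : List String) (out : Int) : Decidable (Spec_sequence_cardinality S T out) := by unfold Spec_sequence_cardinality; infer_instance

-- ===== CLAIM (what is proved, stated in full; the proofs are below) =====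
def Claim_equal_sequence_cardinality : Prop := ∀ (S : String) (T : List String), Dom_sequence_cardinality S T → Spec_sequence_cardinality S T (sequence_cardinality S T)

-- ===== LEMMAS AND PROOFS =====

-- pat Sl n L pos : L matches the cyclic pattern of Sl starting at position pos
def pat (Sl : List String) (n : Nat) : List String → Nat → Bool
  | [], _ => true
  | a :: L, pos => (a == Sl.getD (pos % n) "") && pat Sl n L (pos + 1)

theorem pat_append (Sl : List String) (n : Nat) (L1 L2 : List String) (pos : Nat) :
    pat Sl n (L1 ++ L2) pos = (pat Sl n L1 pos && pat Sl n L2 (pos + L1.length)) := by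
  induction L1 generalizing pos with
  | nil => simp [pat]
  | cons a L ih =>
      simp [pat, ih, Bool.and_assoc]
      ring_nf

theorem pat_shift (Sl : List String) (n : Nat) (L : List String) (pos : Nat) :
    pat Sl n L (pos + n) = pat Sl n L pos := by
  induction L generalizing pos with
  | nil => rfl
  | cons a L ih =>
      have : pos + n + 1 = (pos + 1) + n := by omega
      simp [pat, Nat.add_mod_right, this, ih]

theorem pat_small (Sl : List String) (L : List String) (pos : Nat)
    (h : pos + L.length ≤ Sl.length) :
    (pat Sl Sl.length L pos = true ↔ L = (Sl.drop pos).take L.length) := by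
  induction L generalizing pos with
  | nil => simp [pat]
  | cons a L ih =>
      have hpos : pos < Sl.length := by simp at h; omega
      have hmod : pos % Sl.length = pos := Nat.mod_eq_of_lt hpos
      have hdrop : Sl.drop pos = Sl[pos] :: Sl.drop (pos + 1) :=
        List.drop_eq_getElem_cons hpos
      have hget : Sl.getD pos "" = Sl[pos] := List.getD_eq_getElem Sl "" hpos
      rw [pat]
      simp only [hmod, hget, hdrop, List.length_cons, List.take_succ_cons,
        Bool.and_eq_true, beq_iff_eq, List.cons.injEq]
      constructor
      · rintro ⟨h1, h2⟩
        exact ⟨h1, (ih (pos + 1) (by simp at h ⊢; omega)).1 h2⟩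
      · rintro ⟨h1, h2⟩
        exact ⟨h1, (ih (pos + 1) (by simp at h ⊢; omega)).2 h2⟩

theorem pat_flatten_iff (Sl : List String) (hn : 1 ≤ Sl.length) :
    ∀ (m : Nat) (F : List String), F.length ≤ m →
      ((List.replicate (F.length / Sl.length) Sl).flatten = F ↔
        (pat Sl Sl.length F 0 = true ∧ F.length % Sl.length = 0)) := by
  intro m
  induction m with
  | zero =>
      intro F hF
      have : F = [] := List.eq_nil_of_length_eq_zero (by omega)
      subst this
      simp [pat]
  | succ m ih =>
      intro F hF
      set n := Sl.length with hn'
      by_cases hlt : F.length < n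
      · rcases eq_or_ne F [] with rfl | hne
        · simp [pat]
        · have hpos : 0 < F.length := List.length_pos_iff.mpr hne
          rw [Nat.div_eq_of_lt hlt, Nat.mod_eq_of_lt hlt]
          simp only [List.replicate_zero, List.flatten_nil]
          constructor
          · intro h; exact absurd h.symm hne
          · rintro ⟨-, h⟩; omega
      · have hlt2 : n ≤ F.length := Nat.le_of_not_lt hlt
        have hlt' : (F.take n).length = n := by simp; omega
        have hlen : F.length = (F.drop n).length + n := by simp; omega
        have hdiv : F.length / n = (F.drop n).length / n + 1 := by
          rw [hlen, Nat.add_div_right _ (by omega)]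
        have hmod : F.length % n = (F.drop n).length % n := by
          rw [hlen, Nat.add_mod_right]
        rw [hdiv, hmod, List.replicate_succ, List.flatten_cons]
        have hihd := ih (F.drop n) (by simp; omega)
        have hpat : pat Sl n F 0 =
            (pat Sl n (F.take n) 0 && pat Sl n (F.drop n) 0) := by
          conv_lhs => rw [(List.take_append_drop n F).symm]
          rw [pat_append, hlt', Nat.zero_add]
          have hs := pat_shift Sl n (F.drop n) 0
          rw [Nat.zero_add] at hs
          rw [hs]
        have htake : (pat Sl n (F.take n) 0 = true ↔ F.take n = Sl) := by
          have hb : 0 + (F.take n).length ≤ Sl.length := by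
            rw [Nat.zero_add, hlt', hn']
          have h := pat_small Sl (F.take n) 0 hb
          rw [List.drop_zero, hlt'] at h
          rw [show List.take n Sl = Sl from by rw [hn', List.take_length]] at h
          exact h
        constructor
        · intro h
          have htk : F.take n = Sl := by
            have h2' := congrArg (List.take n) h
            rw [List.take_left' hn'.symm] at h2'
            exact h2'.symm
          have hdr : (List.replicate ((F.drop n).length / n) Sl).flatten = F.drop n := by
            have h3 := congrArg (List.drop n) h
            rwa [List.drop_left' hn'.symm] at h3
          refine ⟨?_, (hihd.1 hdr).2⟩
          rw [hpat, Bool.and_eq_true, htake]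
          exact ⟨htk, (hihd.1 hdr).1⟩
        · rintro ⟨h1, h2⟩
          rw [hpat, Bool.and_eq_true, htake] at h1
          obtain ⟨htk, hpd⟩ := h1
          have hdr := hihd.2 ⟨hpd, h2⟩
          calc Sl ++ (List.replicate ((F.drop n).length / n) Sl).flatten
              = F.take n ++ F.drop n := by rw [htk, hdr]
            _ = F := List.take_append_drop n F

theorem fold_eq (Sl : List String) (n : Nat) (T : List String) :
    ∀ (pos : Nat) (ok : Bool),
      T.foldl
        (fun (st : Nat × Bool) a =>
          if a ∈ Sl then (st.1 + 1, st.2 && (a == Sl.getD (st.1 % n) "")) else st)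
        (pos, ok)
      = (pos + (T.filter (fun a => decide (a ∈ Sl))).length,
         ok && pat Sl n (T.filter (fun a => decide (a ∈ Sl))) pos) := by
  induction T with
  | nil => intro pos ok; simp [pat]
  | cons a T ih =>
      intro pos ok
      by_cases ha : a ∈ Sl
      · simp only [List.foldl_cons, List.filter_cons, ha, if_pos, decide_true]
        rw [ih (pos + 1) (ok && (a == Sl.getD (pos % n) ""))]
        simp [pat, Bool.and_assoc]
        omega
      · simp only [List.foldl_cons, List.filter_cons, ha, if_neg, decide_false,
          not_false_eq_true]
        exact ih pos ok

-- ===== VERDICT (by name: the statement is the Claim_ definition above) =====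
theorem sequence_cardinality_spec : Claim_equal_sequence_cardinality := by
  intro S T _
  unfold Spec_sequence_cardinality sequence_cardinality sequence_cardinality_alt
  set Sl := pvSyms S with hSl
  by_cases h2 : Sl.length < 2
  · simp [h2]
  · simp only [h2, if_false]
    by_cases hset : Sl.length ≠ (PySem.Set.ofList Sl).length
    · simp [hset]
    · simp only [hset, if_false]
      rw [fold_eq Sl Sl.length T 0 true]
      set F := T.filter (fun a => decide (a ∈ Sl)) with hF
      simp only [Nat.zero_add, Bool.true_and]
      have hiff := pat_flatten_iff Sl (by omega) F.length F (le_refl _)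
      rcases em ((List.replicate (F.length / Sl.length) Sl).flatten = F) with hc | hc
      · obtain ⟨hp, hm⟩ := hiff.1 hc
        rw [if_pos (show (List.replicate (Int.ofNat (F.length / Sl.length)).toNat Sl).flatten = F from hc),
            if_pos (show (pat Sl Sl.length F 0 && (F.length % Sl.length == 0)) = true
              from by rw [hp, hm]; rfl)]
      · rw [if_neg (show ¬ (List.replicate (Int.ofNat (F.length / Sl.length)).toNat Sl).flatten = F from hc),
            if_neg]
        intro hcon
        rw [Bool.and_eq_true, beq_iff_eq] at hcon
        exact hc (hiff.2 ⟨hcon.1, hcon.2⟩)
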